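-- pv_equiv track=rewrite | github.com/pmannion2/ignition-nvim | lsp/ignition_lsp/diagnostics.py | _find_script_line
-- ===== SOURCE A (Python) =====
-- def _find_script_line(raw_text: str, key: str, value_prefix: str) -> int:
--     """Find the 0-indexed line number of a script key in raw JSON text.
--
--     Searches for the pattern "key": "value_start..." to locate the line.
--     Returns 0-indexed line number for LSP diagnostics, or 0 if not found.
--     """
--     search_key = f'"{key}"'
--     # Use the first 30 chars of the value for matching
--     value_start = value_prefix[:30].replace("\n", "\\n")
--
--     lines = raw_text.splitlines()
--     for i, line in enumerate(lines):
--         if search_key in line and value_start[:20] in line: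
--             return i
--
--     # Fallback: just find the key
--     for i, line in enumerate(lines):
--         if search_key in line:
--             return i
--
--     return 0
-- ===== SOURCE B (Python) =====
-- def _find_script_line(raw_text: str, key: str, value_prefix: str) -> int:
--     """Single pass: return immediately on a combined key+value match,
--     remember the first key-only line as a fallback."""
--     search_key = f'"{key}"'
--     value_start = value_prefix[:30].replace("\n", "\\n")[:20]
--     fallback = None
--     for i, line in enumerate(raw_text.splitlines()):
--         if search_key in line:
--             if value_start in line:
--                 return i
--             if fallback is None:
--                 fallback = i
--     return fallback if fallback is not None else 0
-- ===== Notes on version B (the rewrite author's own statement) =====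
-- stated objective: simpler
-- what changed: Replaces A's two sequential scans of the lines with a single pass that returns immediately on a combined key+value match and keeps the first key-only line in a fallback variable.
import Mathlib
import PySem

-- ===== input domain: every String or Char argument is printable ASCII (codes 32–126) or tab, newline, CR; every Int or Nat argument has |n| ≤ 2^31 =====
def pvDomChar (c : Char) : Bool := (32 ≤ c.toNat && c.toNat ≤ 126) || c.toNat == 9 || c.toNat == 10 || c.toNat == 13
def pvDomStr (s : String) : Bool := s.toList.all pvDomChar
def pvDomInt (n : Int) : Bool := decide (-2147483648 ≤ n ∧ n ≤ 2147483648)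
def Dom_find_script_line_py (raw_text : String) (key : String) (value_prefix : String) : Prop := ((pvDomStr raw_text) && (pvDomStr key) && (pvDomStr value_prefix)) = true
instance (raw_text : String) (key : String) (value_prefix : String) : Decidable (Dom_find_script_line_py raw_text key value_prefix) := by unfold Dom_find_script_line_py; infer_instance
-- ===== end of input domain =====

-- B replaces A's two sequential scans of the lines with one pass holding a fallback; objective: simpler.

-- ===== PORT A =====
-- first loop: first line containing both search_key and value_start[:20]
def pvALoop1 (sk vs : String) : List (Int × String) → Option Int
  | [] => none
  | (i, line) :: rest =>
      if PySem.Str.isIn sk line && PySem.Str.isIn vs line then some i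
      else pvALoop1 sk vs rest

-- second loop: first line containing search_key
def pvALoop2 (sk : String) : List (Int × String) → Option Int
  | [] => none
  | (i, line) :: rest =>
      if PySem.Str.isIn sk line then some i else pvALoop2 sk rest

def find_script_line_py (raw_text : String) (key : String) (value_prefix : String) : Int :=
  let search_key := "\"" ++ key ++ "\""
  let value_start := PySem.Str.replace (PySem.Str.slice value_prefix none (some 30)) "\n" "\\n"
  let lines := PySem.Str.splitlines raw_text
  match pvALoop1 search_key (PySem.Str.slice value_start none (some 20)) (PySem.List.enumerate lines 0) with
  | some i => i
  | none =>
    match pvALoop2 search_key (PySem.List.enumerate lines 0) with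
    | some i => i
    | none => 0

-- ===== PORT B =====
-- single pass with a fallback for the first key-only line
def pvBLoop (sk vs : String) : List (Int × String) → Option Int → Int
  | [], fb => fb.getD 0
  | (i, line) :: rest, fb =>
      if PySem.Str.isIn sk line then
        if PySem.Str.isIn vs line then i
        else pvBLoop sk vs rest (if fb.isNone then some i else fb)
      else pvBLoop sk vs rest fb

def find_script_line_py_alt (raw_text : String) (key : String) (value_prefix : String) : Int :=
  let search_key := "\"" ++ key ++ "\""
  let value_start := PySem.Str.slice (PySem.Str.replace (PySem.Str.slice value_prefix none (some 30)) "\n" "\\n") none (some 20)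
  pvBLoop search_key value_start (PySem.List.enumerate (PySem.Str.splitlines raw_text) 0) none

-- ===== PRECONDITION & SPEC =====
def Spec_find_script_line_py (raw_text : String) (key : String) (value_prefix : String) (out : Int) : Prop := out = find_script_line_py_alt raw_text key value_prefix
instance (raw_text : String) (key : String) (value_prefix : String) (out : Int) : Decidable (Spec_find_script_line_py raw_text key value_prefix out) := by unfold Spec_find_script_line_py; infer_instance

-- ===== CLAIM (what is proved, stated in full; the proofs are below) =====
def Claim_equal_find_script_line_py : Prop := ∀ (raw_text : String) (key : String) (value_prefix : String), Dom_find_script_line_py raw_text key value_prefix → Spec_find_script_line_py raw_text key value_prefix (find_script_line_py raw_text key value_prefix)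

-- ===== LEMMAS AND PROOFS =====

-- the nested match of A equals B's fb = none collapse
theorem pvMatch_eq (o p : Option Int) :
    (match o with
     | some i => i
     | none => match p with | some i => i | none => (0 : Int)) =
      (match o with
       | some i => i
       | none => (none : Option Int).getD (p.getD 0)) := by
  cases o <;> cases p <;> simp

-- B's one-pass loop equals A's two loops, for any pending fallback fb
theorem pvBLoop_eq (sk vs : String) (l : List (Int × String)) (fb : Option Int) :
    pvBLoop sk vs l fb =
      match pvALoop1 sk vs l with
      | some i => i
      | none => fb.getD ((pvALoop2 sk l).getD 0) := by
  induction l generalizing fb with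
  | nil => cases fb <;> simp [pvBLoop, pvALoop1, pvALoop2]
  | cons p rest ih =>
    obtain ⟨i, line⟩ := p
    by_cases hk : PySem.Chars.isIn sk.toList line.toList = true
    · by_cases hv : PySem.Chars.isIn vs.toList line.toList = true
      · simp [pvBLoop, pvALoop1, PySem.Str.isIn, hk, hv]
      · cases fb <;>
          simp [pvBLoop, pvALoop1, pvALoop2, PySem.Str.isIn, hk, hv, ih]
    · simp [pvBLoop, pvALoop1, pvALoop2, PySem.Str.isIn, hk, ih]

-- ===== VERDICT (by name: the statement is the Claim_ definition above) =====
theorem find_script_line_py_spec : Claim_equal_find_script_line_py := by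
  intro raw_text key value_prefix _
  unfold Spec_find_script_line_py find_script_line_py find_script_line_py_alt
  rw [pvBLoop_eq]
  exact pvMatch_eq _ _
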